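-- pv_equiv track=rewrite | github.com/QSOLKCB/QEC | src/qec/analysis/networkx_topology_analysis.py | _canonical_cycle
-- ===== SOURCE A (Python) =====
-- def _canonical_cycle(cycle: list[str]) -> tuple[str, ...]:
--     """Return a deterministic canonical rotation for a cycle."""
--     if not cycle:
--         return ()
--     n = len(cycle)
--     forward_rotations = [tuple(cycle[i:] + cycle[:i]) for i in range(n)]
--     reversed_cycle = list(reversed(cycle))
--     reversed_rotations = [tuple(reversed_cycle[i:] + reversed_cycle[:i]) for i in range(n)]
--     return min(forward_rotations + reversed_rotations)
-- ===== SOURCE B (Python) =====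
-- def _canonical_cycle(cycle: list[str]) -> tuple[str, ...]:
--     """Return a deterministic canonical rotation for a cycle.
--
--     Only rotations starting at a minimal element can be the lexicographic
--     minimum, so scan a doubled list and compare just those candidates."""
--     if not cycle:
--         return ()
--     n = len(cycle)
--     m = min(cycle)
--     best = None
--     for seq in (cycle, cycle[::-1]):
--         doubled = seq + seq
--         for i in range(n):
--             if seq[i] == m:
--                 cand = tuple(doubled[i:i + n])
--                 if best is None or cand < best:
--                     best = cand
--     return best
-- ===== Notes on version B (the rewrite author's own statement) =====
-- stated objective: alternative
-- what changed: Instead of materialising all 2n rotations and taking min, B computes the minimal element m once and keeps a running best over only the rotations that start at an occurrence of m, read off a doubled list.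
import Mathlib
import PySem

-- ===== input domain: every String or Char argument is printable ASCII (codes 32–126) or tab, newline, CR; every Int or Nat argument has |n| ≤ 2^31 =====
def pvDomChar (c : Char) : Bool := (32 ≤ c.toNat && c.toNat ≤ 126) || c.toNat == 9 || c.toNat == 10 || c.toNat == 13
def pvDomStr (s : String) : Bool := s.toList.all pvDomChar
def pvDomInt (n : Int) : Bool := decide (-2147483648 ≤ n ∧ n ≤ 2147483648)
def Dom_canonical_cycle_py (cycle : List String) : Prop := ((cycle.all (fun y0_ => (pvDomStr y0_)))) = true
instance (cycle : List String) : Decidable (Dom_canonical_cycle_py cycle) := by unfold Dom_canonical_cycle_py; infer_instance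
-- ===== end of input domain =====

-- B replaces A's "build all 2n rotations and take min" by a doubled-list scan that
-- keeps a running best over only the rotations starting at a minimal element (objective: alternative).


-- ===== PORT A =====
-- literal port of _canonical_cycle: all forward and reversed rotations, then min
-- (min of a nonempty list is always `some`; the `.getD []` default is unreachable)
def canonical_cycle_py (cycle : List String) : List String :=
  if cycle = [] then []
  else
    let n : Int := PySem.List.len cycle
    let forward_rotations := (PySem.List.pyRange 0 n 1).map
      (fun i => PySem.List.slice cycle (some i) none ++ PySem.List.slice cycle none (some i))
    let reversed_cycle := cycle.reverse   -- list(reversed(cycle))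
    let reversed_rotations := (PySem.List.pyRange 0 n 1).map
      (fun i => PySem.List.slice reversed_cycle (some i) none ++ PySem.List.slice reversed_cycle none (some i))
    (PySem.List.min? (forward_rotations ++ reversed_rotations) (fun t => t)).getD []

-- ===== PORT B =====
-- 'best is None or cand < best' accumulator step of Source B
def pvOptMin (best : Option (List String)) (cand : List String) : Option (List String) :=
  match best with
  | none => some cand
  | some b => if cand < b then some cand else some b

-- port of Source B: only rotations starting at a minimal element are candidates,
-- read off a doubled list; cycle[::-1] is List.reverse (PySem.List.slice?_none_none_neg_one)
def canonical_cycle_py_alt (cycle : List String) : List String :=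
  if cycle = [] then []
  else
    let n : Int := PySem.List.len cycle
    let m := (PySem.List.min? cycle (fun s => s)).getD ""   -- min of a nonempty list
    let best := [cycle, cycle.reverse].foldl
      (fun best seq =>
        let doubled := seq ++ seq
        (PySem.List.pyRange 0 n 1).foldl
          (fun best i =>
            if PySem.List.pyGetD seq i "" = m then
              pvOptMin best (PySem.List.slice doubled (some i) (some (i + n)))
            else best)
          best)
      none
    best.getD []

-- ===== PRECONDITION & SPEC =====
def Spec_canonical_cycle_py (cycle : List String) (out : List String) : Prop := out = canonical_cycle_py_alt cycle
instance (cycle : List String) (out : List String) : Decidable (Spec_canonical_cycle_py cycle out) := by unfold Spec_canonical_cycle_py; infer_instance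

-- ===== CLAIM (what is proved, stated in full; the proofs are below) =====
def Claim_equal_canonical_cycle_py : Prop := ∀ (cycle : List String), Dom_canonical_cycle_py cycle → Spec_canonical_cycle_py cycle (canonical_cycle_py cycle)

-- ===== LEMMAS AND PROOFS =====

-- rotation of seq starting at position k
def pvRot (seq : List String) (k : Nat) : List String := seq.drop k ++ seq.take k

-- A's rotation lists
def pvRots (seq : List String) : List (List String) := (List.range seq.length).map (pvRot seq)

-- B's candidate list: rotations starting where the element equals m
def pvCands (seq : List String) (m : String) : List (List String) :=
  ((List.range seq.length).filter (fun k => decide (seq.getD k "" = m))).map (pvRot seq)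

lemma pvRot_cons (seq : List String) (k : Nat) (h : k < seq.length) :
    pvRot seq k = seq[k] :: (seq.drop (k + 1) ++ seq.take k) := by
  unfold pvRot
  conv_lhs => rw [List.drop_eq_getElem_cons h]
  rw [List.cons_append]

lemma pvDoubled_slice (seq : List String) (k : Nat) (h : k ≤ seq.length) :
    ((seq ++ seq).drop k).take seq.length = pvRot seq k := by
  rw [List.drop_append_of_le_length h]
  rw [List.take_append]
  have h1 : (seq.drop k).length = seq.length - k := by simp
  rw [List.take_of_length_le (by omega)]
  unfold pvRot
  congr 1
  rw [h1]
  congr 1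
  omega

lemma pvFoldl_some (l : List (List String)) (a : List String) :
    ∃ b, l.foldl pvOptMin (some a) = some b ∧ (b = a ∨ b ∈ l) ∧ b ≤ a ∧ ∀ y ∈ l, b ≤ y := by
  induction l generalizing a with
  | nil => exact ⟨a, rfl, Or.inl rfl, le_refl _, by simp⟩
  | cons x t ih =>
    simp only [List.foldl_cons]
    by_cases hx : x < a
    · simp only [pvOptMin, if_pos hx]
      obtain ⟨b, hb, hmem, hle, hall⟩ := ih x
      refine ⟨b, hb, Or.inr ?_, le_trans hle (le_of_lt hx), ?_⟩
      · rcases hmem with rfl | hm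
        · exact List.mem_cons_self
        · exact List.mem_cons_of_mem _ hm
      · intro y hy
        rcases List.mem_cons.mp hy with rfl | hy
        · exact hle
        · exact hall y hy
    · simp only [pvOptMin, if_neg hx]
      obtain ⟨b, hb, hmem, hle, hall⟩ := ih a
      refine ⟨b, hb, hmem.imp id (List.mem_cons_of_mem _), hle, ?_⟩
      intro y hy
      rcases List.mem_cons.mp hy with rfl | hy
      · exact le_trans hle (not_lt.mp hx)
      · exact hall y hy

lemma pvFoldl_none (l : List (List String)) (hl : l ≠ []) :
    ∃ b, l.foldl pvOptMin none = some b ∧ b ∈ l ∧ ∀ y ∈ l, b ≤ y := by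
  cases l with
  | nil => exact absurd rfl hl
  | cons x t =>
    simp only [List.foldl_cons, pvOptMin]
    obtain ⟨b, hb, hmem, hle, hall⟩ := pvFoldl_some t x
    refine ⟨b, hb, ?_, ?_⟩
    · rcases hmem with rfl | hm
      · exact List.mem_cons_self
      · exact List.mem_cons_of_mem _ hm
    · intro y hy
      rcases List.mem_cons.mp hy with rfl | hy
      · exact hle
      · exact hall y hy

-- A unfolds to min over the two rotation lists
lemma pvMap_rots (cycle seq : List String) (hlen : seq.length = cycle.length) :
    (PySem.List.pyRange 0 (PySem.List.len cycle) 1).map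
      (fun i => PySem.List.slice seq (some i) none ++ PySem.List.slice seq none (some i))
    = pvRots seq := by
  rw [PySem.List.len_eq, PySem.List.pyRange_zero_nat, List.map_map]
  unfold pvRots
  rw [hlen]
  apply List.map_congr_left
  intro k _
  simp only [Function.comp]
  rw [PySem.List.slice_from_natCast, PySem.List.slice_to_natCast]
  rfl

lemma pvA_eq (cycle : List String) (h : cycle ≠ []) :
    canonical_cycle_py cycle =
      (PySem.List.min? (pvRots cycle ++ pvRots cycle.reverse) (fun t => t)).getD [] := by
  simp only [canonical_cycle_py, if_neg h]
  rw [pvMap_rots cycle cycle rfl, pvMap_rots cycle cycle.reverse (List.length_reverse)]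

-- one inner loop of B is a pvOptMin-fold over the candidate list
lemma pvB_inner (seq : List String) (m : String) (acc : Option (List String))
    (N : Int) (hN : N = (seq.length : Int)) :
    (PySem.List.pyRange 0 N 1).foldl
      (fun best i =>
        if PySem.List.pyGetD seq i "" = m then
          pvOptMin best (PySem.List.slice (seq ++ seq) (some i) (some (i + N)))
        else best) acc
    = (pvCands seq m).foldl pvOptMin acc := by
  rw [hN, PySem.List.pyRange_zero_nat, List.foldl_map]
  have h1 : (List.range seq.length).foldl
      (fun (b : Option (List String)) (k : Nat) =>
        if PySem.List.pyGetD seq (k : Int) "" = m then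
          pvOptMin b (PySem.List.slice (seq ++ seq) (some (k : Int)) (some ((k : Int) + (seq.length : Int))))
        else b) acc
      = (List.range seq.length).foldl
      (fun (b : Option (List String)) (k : Nat) =>
        if seq.getD k "" = m then pvOptMin b (pvRot seq k) else b) acc := by
    apply PySem.List.foldl_congr_mem
    intro b k hk
    have hk' : k < seq.length := List.mem_range.mp hk
    rw [PySem.List.pyGetD_natCast]
    congr 1
    rw [PySem.List.slice_natCast_add, pvDoubled_slice seq k (le_of_lt hk')]
  rw [h1]
  rw [PySem.List.foldl_ite_eq_foldl_filter (fun k => seq.getD k "" = m)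
      (fun (b : Option (List String)) (k : Nat) => pvOptMin b (pvRot seq k))]
  rw [← List.foldl_map]
  rfl

-- B unfolds to the pvOptMin-fold over both candidate lists
lemma pvB_eq (cycle : List String) (h : cycle ≠ []) :
    canonical_cycle_py_alt cycle =
      (((pvCands cycle ((PySem.List.min? cycle (fun s => s)).getD "")
        ++ pvCands cycle.reverse ((PySem.List.min? cycle (fun s => s)).getD "")).foldl
          pvOptMin none)).getD [] := by
  simp only [canonical_cycle_py_alt, if_neg h, List.foldl_cons, List.foldl_nil]
  rw [pvB_inner cycle _ none (PySem.List.len cycle) (by rw [PySem.List.len_eq])]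
  rw [pvB_inner cycle.reverse _ _ (PySem.List.len cycle)
      (by rw [PySem.List.len_eq, List.length_reverse])]
  rw [List.foldl_append]

-- membership characterisation of candidates
lemma pvCands_mem {seq : List String} {m : String} {c : List String} (hc : c ∈ pvCands seq m) :
    ∃ k, ∃ (hk : k < seq.length), seq[k] = m ∧ c = pvRot seq k := by
  unfold pvCands at hc
  obtain ⟨k, hk, rfl⟩ := List.mem_map.mp hc
  have hk1 := List.mem_filter.mp hk
  have hkr : k < seq.length := List.mem_range.mp hk1.1
  have hkm : seq.getD k "" = m := of_decide_eq_true hk1.2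
  rw [List.getD_eq_getElem seq "" hkr] at hkm
  exact ⟨k, hkr, hkm, rfl⟩

lemma pvCands_sub {seq : List String} {m : String} {c : List String} (hc : c ∈ pvCands seq m) :
    c ∈ pvRots seq := by
  obtain ⟨k, hk, _, rfl⟩ := pvCands_mem hc
  exact List.mem_map.mpr ⟨k, List.mem_range.mpr hk, rfl⟩

-- the fold result bounds every rotation, candidate or not
lemma pvLe_rots {seq : List String} {m : String} {b : List String}
    (hlow : ∀ y ∈ seq, m ≤ y)
    (hbhead : ∃ bt, b = m :: bt)
    (hbc : ∀ c ∈ pvCands seq m, b ≤ c) :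
    ∀ y ∈ pvRots seq, b ≤ y := by
  intro y hy
  obtain ⟨i, hi, rfl⟩ := List.mem_map.mp hy
  have hi' : i < seq.length := List.mem_range.mp hi
  by_cases he : seq.getD i "" = m
  · exact hbc _ (List.mem_map.mpr ⟨i, List.mem_filter.mpr ⟨hi, decide_eq_true he⟩, rfl⟩)
  · have hmem : seq[i]'hi' ∈ seq := List.getElem_mem hi'
    have hle : m ≤ seq[i]'hi' := hlow _ hmem
    have hne : m ≠ seq[i]'hi' := by
      intro e
      exact he (by rw [List.getD_eq_getElem seq "" hi', ← e])
    have hlt : m < seq[i]'hi' := lt_of_le_of_ne hle hne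
    obtain ⟨bt, rfl⟩ := hbhead
    rw [pvRot_cons seq i hi']
    exact le_of_lt (List.cons_lt_cons_iff.mpr (Or.inl hlt))

lemma pvRots_ne_nil {seq : List String} (h : seq ≠ []) : pvRots seq ≠ [] := by
  unfold pvRots
  simp [List.range_eq_nil, h]

-- ===== VERDICT (by name: the statement is the Claim_ definition above) =====
theorem canonical_cycle_py_spec : Claim_equal_canonical_cycle_py := by
  intro cycle _
  unfold Spec_canonical_cycle_py
  by_cases h : cycle = []
  · subst h; rfl
  · rw [pvA_eq cycle h, pvB_eq cycle h]
    -- the minimum m of the cycle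
    obtain ⟨m, hm⟩ : ∃ m, PySem.List.min? cycle (fun s => s) = some m := by
      cases hmm : PySem.List.min? cycle (fun s => s) with
      | none => exact absurd ((PySem.List.min?_eq_none_iff cycle _).mp hmm) h
      | some m => exact ⟨m, rfl⟩
    have hmd : (PySem.List.min? cycle (fun s => s)).getD "" = m := by rw [hm]; rfl
    rw [hmd]
    have hmmem : m ∈ cycle := PySem.List.min?_mem hm
    have hmlow : ∀ y ∈ cycle, m ≤ y := PySem.List.min?_isMin hm
    have hmlowr : ∀ y ∈ cycle.reverse, m ≤ y := fun y hy => hmlow y (List.mem_reverse.mp hy)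
    -- the candidate list is nonempty
    set C := pvCands cycle m ++ pvCands cycle.reverse m with hC
    have hCne : C ≠ [] := by
      obtain ⟨i, hi, hie⟩ := List.mem_iff_getElem.mp hmmem
      have : pvRot cycle i ∈ pvCands cycle m := by
        refine List.mem_map.mpr ⟨i, List.mem_filter.mpr ⟨List.mem_range.mpr hi, ?_⟩, rfl⟩
        exact decide_eq_true (by rw [List.getD_eq_getElem cycle "" hi]; exact hie)
      intro he
      rw [hC] at he
      rcases List.append_eq_nil_iff.mp he with ⟨h1, _⟩
      rw [h1] at this
      exact absurd this (List.not_mem_nil)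
    obtain ⟨b, hfold, hbC, hball⟩ := pvFoldl_none C hCne
    -- the minimum a of all rotations
    set R := pvRots cycle ++ pvRots cycle.reverse with hR
    obtain ⟨a, ha⟩ : ∃ a, PySem.List.min? R (fun t => t) = some a := by
      cases haa : PySem.List.min? R (fun t => t) with
      | none =>
        have := (PySem.List.min?_eq_none_iff R _).mp haa
        rw [hR] at this
        rcases List.append_eq_nil_iff.mp this with ⟨h1, _⟩
        exact absurd h1 (pvRots_ne_nil h)
      | some a => exact ⟨a, rfl⟩
    have haR : a ∈ R := PySem.List.min?_mem ha
    have hamin : ∀ y ∈ R, a ≤ y := by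
      have ha' : (@PySem.List.min? (List String) (List String)
          LinearOrder.toPartialOrder.toLT LinearOrder.toDecidableLT R (fun t => t)) = some a := by
        rw [Subsingleton.elim (LinearOrder.toDecidableLT : DecidableLT (List String))
          (fun a b => a.decidableLT b)]
        exact ha
      intro y hy
      exact PySem.List.min?_isMin ha' y hy
    -- b's head is m
    have hbhead : ∃ bt, b = m :: bt := by
      rcases List.mem_append.mp hbC with hb1 | hb2
      · obtain ⟨k, hk, hke, rfl⟩ := pvCands_mem hb1
        exact ⟨_, by rw [pvRot_cons cycle k hk, hke]⟩
      · obtain ⟨k, hk, hke, rfl⟩ := pvCands_mem hb2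
        exact ⟨_, by rw [pvRot_cons cycle.reverse k hk, hke]⟩
    -- b ≤ every rotation
    have hbR : ∀ y ∈ R, b ≤ y := by
      intro y hy
      rcases List.mem_append.mp hy with hy1 | hy2
      · exact pvLe_rots hmlow hbhead
          (fun c hc => hball c (List.mem_append.mpr (Or.inl hc))) y hy1
      · exact pvLe_rots hmlowr hbhead
          (fun c hc => hball c (List.mem_append.mpr (Or.inr hc))) y hy2
    -- b is itself a rotation
    have hbRmem : b ∈ R := by
      rcases List.mem_append.mp hbC with hb1 | hb2
      · exact List.mem_append.mpr (Or.inl (pvCands_sub hb1))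
      · exact List.mem_append.mpr (Or.inr (pvCands_sub hb2))
    have : a = b := le_antisymm (hamin b hbRmem) (hbR a haR)
    rw [ha, hfold, this]
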